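-- pv_equiv track=rewrite | github.com/loganrooks/PDFAgentialConversion | src/pdfmd/convert/convert_pdf.py | select_monotonic_page_observations
-- ===== SOURCE A (Python) =====
-- from typing import Any
--
-- def select_monotonic_page_observations(candidates: list[dict[str, Any]]) -> list[dict[str, Any]]:
--     if not candidates:
--         return []
--     ordered = sorted(candidates, key=lambda item: (item["pdf_page"], item["book_page"]))
--     best_lengths = [1] * len(ordered)
--     best_span = [0] * len(ordered)
--     previous_index = [-1] * len(ordered)
--
--     for current_index, current in enumerate(ordered):
--         for candidate_index, candidate in enumerate(ordered[:current_index]):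
--             if candidate["pdf_page"] >= current["pdf_page"]:
--                 continue
--             if candidate["book_page"] >= current["book_page"]:
--                 continue
--             pdf_gap = current["pdf_page"] - candidate["pdf_page"]
--             book_gap = current["book_page"] - candidate["book_page"]
--             if pdf_gap > max(18, book_gap * 5):
--                 continue
--             length = best_lengths[candidate_index] + 1
--             span = best_span[candidate_index] + (current["book_page"] - candidate["book_page"])
--             if length > best_lengths[current_index] or (
--                 length == best_lengths[current_index] and span > best_span[current_index]
--             ):
--                 best_lengths[current_index] = length
--                 best_span[current_index] = span
--                 previous_index[current_index] = candidate_index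
--
--     best_end = max(
--         range(len(ordered)),
--         key=lambda index: (best_lengths[index], best_span[index], ordered[index]["pdf_page"]),
--     )
--     selected: list[dict[str, Any]] = []
--     while best_end != -1:
--         selected.append(ordered[best_end])
--         best_end = previous_index[best_end]
--     selected.reverse()
--     return selected
-- ===== SOURCE B (Python) =====
-- def select_monotonic_page_observations(candidates):
--     if not candidates:
--         return []
--     ordered = sorted(candidates, key=lambda item: (item["pdf_page"], item["book_page"]))
--
--     def links(prev, cur):
--         return (prev["pdf_page"] < cur["pdf_page"]
--                 and prev["book_page"] < cur["book_page"]
--                 and cur["pdf_page"] - prev["pdf_page"]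
--                     <= max(18, (cur["book_page"] - prev["book_page"]) * 5))
--
--     memo = {}
--
--     def chain(i):
--         # best (length, book-page span, chain of observations) ending at ordered[i]
--         if i not in memo:
--             cur = ordered[i]
--             ext = [(l + 1, s + cur["book_page"] - c[-1]["book_page"], c + [cur])
--                    for (l, s, c) in (chain(j) for j in range(i)
--                                      if links(ordered[j], cur))]
--             memo[i] = max(ext, key=lambda t: (t[0], t[1]), default=(1, 0, [cur]))
--         return memo[i]
--
--     return max((chain(i) for i in range(len(ordered))),
--                key=lambda t: (t[0], t[1], t[2][-1]["pdf_page"]))[2]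
-- ===== Notes on version B (the rewrite author's own statement) =====
-- stated objective: alternative
-- what changed: Replaces A's bottom-up index-array tabulation (best_lengths/best_span/previous_index tables mutated in place, argmax over indices, backward predecessor-pointer walk plus reverse) by a top-down memoized recursion chain(i) that returns the best (length, span, chain) ending at ordered[i] directly, computed as a max over a comprehension of recursively extended predecessor chains, so no DP arrays, no predecessor pointers, no backward walk and no reverse exist.
import Mathlib
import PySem

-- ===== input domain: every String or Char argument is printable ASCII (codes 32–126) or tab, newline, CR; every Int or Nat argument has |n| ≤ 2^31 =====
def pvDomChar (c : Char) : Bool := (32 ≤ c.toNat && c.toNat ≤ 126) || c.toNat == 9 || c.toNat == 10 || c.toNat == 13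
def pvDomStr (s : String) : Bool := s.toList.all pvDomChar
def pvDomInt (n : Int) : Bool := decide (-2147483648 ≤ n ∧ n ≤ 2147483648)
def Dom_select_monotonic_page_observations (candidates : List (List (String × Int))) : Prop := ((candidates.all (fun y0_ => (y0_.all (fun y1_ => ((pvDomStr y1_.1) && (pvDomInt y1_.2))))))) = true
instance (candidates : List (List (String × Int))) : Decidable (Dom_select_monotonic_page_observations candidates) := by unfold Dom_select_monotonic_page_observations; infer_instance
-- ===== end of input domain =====

-- B replaces A's bottom-up index-array tabulation (length/span/previous-index tables,
-- argmax over indices, backward pointer walk + reverse) by a top-down memoized recursion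
-- chain(i) returning the best (length, span, chain) ending at ordered[i] directly;
-- equal return value on Pre_ (dicts that carry both page keys).

-- shared helpers: item["k"] (first-match association-list lookup; Pre_ guarantees the key
-- is present, so the `getD 0` default is never the value Python would have raised on)
def pvPg (d : List (String × Int)) (k : String) : Int := (List.lookup k d).getD 0

-- Python tuple comparison (a, b) < (x, y) and (a, b, c) < (x, y, z) on ints
def pvLex2 (a b : Int × Int) : Bool :=
  decide (a.1 < b.1) || (a.1 == b.1 && decide (a.2 < b.2))
def pvLex3 (a b : Int × Int × Int) : Bool :=
  decide (a.1 < b.1) || (a.1 == b.1 && pvLex2 a.2 b.2)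

-- ===== PORT A =====
-- the inner `for candidate_index, candidate in enumerate(ordered[:current_index])` body:
-- acc is (best_lengths[i], best_span[i], previous_index[i]) being updated in place
def pvAccA (st : List (Int × Int × Int)) (current : List (String × Int))
    (cj : Int × List (String × Int)) (acc : Int × Int × Int) : Int × Int × Int :=
  let cand := cj.2
  if pvPg cand "pdf_page" ≥ pvPg current "pdf_page" then acc
  else if pvPg cand "book_page" ≥ pvPg current "book_page" then acc
  else
    let pdf_gap := pvPg current "pdf_page" - pvPg cand "pdf_page"
    let book_gap := pvPg current "book_page" - pvPg cand "book_page"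
    if pdf_gap > max 18 (book_gap * 5) then acc
    else
      let length := (PySem.List.pyGetD st cj.1 (1, 0, -1)).1 + 1
      let span := (PySem.List.pyGetD st cj.1 (1, 0, -1)).2.1 +
        (pvPg current "book_page" - pvPg cand "book_page")
      if length > acc.1 ∨ (length = acc.1 ∧ span > acc.2.1) then (length, span, cj.1) else acc

-- one iteration of the outer loop: st holds the finalized (length, span, prev) triples of
-- the indices already processed (the untouched array cells to the right are the defaults)
def pvStepA (ordered : List (List (String × Int))) (st : List (Int × Int × Int))
    (ci : Int × List (String × Int)) : List (Int × Int × Int) :=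
  st ++ [(PySem.List.enumerate (PySem.List.slice ordered none (some ci.1))).foldl
          (fun acc cj => pvAccA st ci.2 cj acc) (1, 0, -1)]

-- the `while best_end != -1: selected.append(ordered[best_end]); best_end = previous_index[best_end]`
-- loop; fuel = len(ordered) bounds the walk (previous_index strictly decreases)
def pvWalk (ordered : List (List (String × Int))) (st : List (Int × Int × Int)) :
    Nat → Int → List (List (String × Int))
  | 0, _ => []
  | fuel + 1, i =>
    if i = -1 then []
    else PySem.List.pyGetD ordered i [] ::
      pvWalk ordered st fuel (PySem.List.pyGetD st i (1, 0, -1)).2.2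

def select_monotonic_page_observations (candidates : List (List (String × Int))) :
    List (List (String × Int)) :=
  if candidates = [] then [] else
  let ordered := PySem.List.sorted2 candidates
    (fun item => pvPg item "pdf_page") (fun item => pvPg item "book_page")
  let st := (PySem.List.enumerate ordered).foldl (pvStepA ordered) []
  let keyf := fun (idx : Int) =>
    ((PySem.List.pyGetD st idx (1, 0, -1)).1, (PySem.List.pyGetD st idx (1, 0, -1)).2.1,
      pvPg (PySem.List.pyGetD ordered idx []) "pdf_page")
  -- max(range(len(ordered)), key=…): first element, then replace on strictly larger key
  match PySem.List.pyRange 0 (ordered.length : Int) 1 with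
  | [] => []   -- unreachable: ordered is nonempty here (Python's max would raise on [])
  | i0 :: rest =>
    let best_end := rest.foldl (fun b idx => if pvLex3 (keyf b) (keyf idx) then idx else b) i0
    (pvWalk ordered st ordered.length best_end).reverse

-- ===== PORT B =====
-- the helper `links(prev, cur)` of Source B
def pvLinks (prev cur : List (String × Int)) : Bool :=
  decide (pvPg prev "pdf_page" < pvPg cur "pdf_page") &&
  decide (pvPg prev "book_page" < pvPg cur "book_page") &&
  decide (pvPg cur "pdf_page" - pvPg prev "pdf_page" ≤
    max 18 ((pvPg cur "book_page" - pvPg prev "book_page") * 5))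

-- the recursive `chain(i)` of Source B (the Python memo is a pure-value cache, so the
-- uncached recursion computes the same value; the dead `else` branch of the dite only
-- makes the recursion's termination visible — the filter guarantees j < i)
def pvChain (ordered : List (List (String × Int))) (i : Nat) :
    Int × Int × List (List (String × Int)) :=
  let cur := PySem.List.pyGetD ordered (i : Int) []
  let ext := (((List.range i).filter
      (fun (j : Nat) => pvLinks (PySem.List.pyGetD ordered (j : Int) []) cur)).map
      (fun j => if h : j < i then pvChain ordered j else (0, 0, []))).map
    (fun t => (t.1 + 1,
      t.2.1 + (pvPg cur "book_page" - pvPg (PySem.List.pyGetD t.2.2 (-1) []) "book_page"),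
      t.2.2 ++ [cur]))
  -- max(ext, key=λt.(t[0],t[1]), default=(1,0,[cur])): first maximum
  match ext with
  | [] => (1, 0, [cur])
  | e :: rest => rest.foldl (fun b t => if pvLex2 (b.1, b.2.1) (t.1, t.2.1) then t else b) e
termination_by i
decreasing_by exact h

-- key of Source B's final max: (length, span, pdf_page of the chain's last element)
def pvKeyB (t : Int × Int × List (List (String × Int))) : Int × Int × Int :=
  (t.1, t.2.1, pvPg (PySem.List.pyGetD t.2.2 (-1) []) "pdf_page")

def select_monotonic_page_observations_alt (candidates : List (List (String × Int))) :
    List (List (String × Int)) :=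
  if candidates = [] then [] else
  let ordered := PySem.List.sorted2 candidates
    (fun item => pvPg item "pdf_page") (fun item => pvPg item "book_page")
  -- max((chain(i) for i in range(len(ordered))), key=…)[2]: first maximum
  match (List.range ordered.length).map (pvChain ordered) with
  | [] => []   -- unreachable: ordered is nonempty here (Python's max would raise on [])
  | t0 :: rest =>
    (rest.foldl (fun w t => if pvLex3 (pvKeyB w) (pvKeyB t) then t else w) t0).2.2

-- ===== PRECONDITION & SPEC =====
-- Pre_ excludes exactly the dicts missing the "pdf_page" or "book_page" key, on which the
-- Python A raises KeyError (B raises there too).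
def Pre_select_monotonic_page_observations (candidates : List (List (String × Int))) : Prop :=
  (candidates.all (fun c =>
    (List.lookup "pdf_page" c).isSome && (List.lookup "book_page" c).isSome)) = true
instance (candidates : List (List (String × Int))) : Decidable (Pre_select_monotonic_page_observations candidates) := by unfold Pre_select_monotonic_page_observations; infer_instance

def pvWitness_select_monotonic_page_observations : (List (List (String × Int))) :=
  [[("pdf_page", 1), ("book_page", 2)], [("pdf_page", 3), ("book_page", 4)]]

def Spec_select_monotonic_page_observations (candidates : List (List (String × Int))) (out : List (List (String × Int))) : Prop := out = select_monotonic_page_observations_alt candidates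
instance (candidates : List (List (String × Int))) (out : List (List (String × Int))) : Decidable (Spec_select_monotonic_page_observations candidates out) := by unfold Spec_select_monotonic_page_observations; infer_instance

-- ===== CLAIM (what is proved, stated in full; the proofs are below) =====
def Claim_equal_select_monotonic_page_observations : Prop := ∀ (candidates : List (List (String × Int))), Dom_select_monotonic_page_observations candidates → Pre_select_monotonic_page_observations candidates → Spec_select_monotonic_page_observations candidates (select_monotonic_page_observations candidates)

-- ===== LEMMAS AND PROOFS =====

-- proof-internal bridge: the forward chain-building step (one iteration of a bottom-up
-- fold whose k-th state entry equals pvChain ordered k; it mediates between A's tables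
-- and B's recursion)
def pvStepB (chains : List (Int × Int × List (List (String × Int))))
    (cur : List (String × Int)) : List (Int × Int × List (List (String × Int))) :=
  let options := chains.foldl (fun opts t =>
    let prev := PySem.List.pyGetD t.2.2 (-1) []
    let gap := pvPg cur "book_page" - pvPg prev "book_page"
    if pvPg prev "pdf_page" < pvPg cur "pdf_page" ∧ pvPg prev "book_page" < pvPg cur "book_page" ∧
        pvPg cur "pdf_page" - pvPg prev "pdf_page" ≤ max 18 (gap * 5)
    then opts ++ [(t.1 + 1, t.2.1 + gap, t.2.2)] else opts) []
  match options with
  | [] => chains ++ [(1, 0, [cur])]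
  | o :: rest =>
    let best := rest.foldl (fun best opt =>
      if pvLex2 (best.1, best.2.1) (opt.1, opt.2.1) then opt else best) o
    chains ++ [(best.1, best.2.1, best.2.2 ++ [cur])]

-- the validity test shared by both ports' inner filters, as one Bool
def pvValidB (cur prev : List (String × Int)) : Bool :=
  decide (pvPg prev "pdf_page" < pvPg cur "pdf_page" ∧ pvPg prev "book_page" < pvPg cur "book_page" ∧
    pvPg cur "pdf_page" - pvPg prev "pdf_page" ≤ max 18 ((pvPg cur "book_page" - pvPg prev "book_page") * 5))

lemma pvLinks_eq_valid (prev cur : List (String × Int)) :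
    pvLinks prev cur = pvValidB cur prev := by
  simp [pvLinks, pvValidB, Bool.and_assoc]

def pvOptA (st : List (Int × Int × Int)) (cur : List (String × Int))
    (cj : Int × List (String × Int)) : Int × Int × Int :=
  ((PySem.List.pyGetD st cj.1 (1, 0, -1)).1 + 1,
   (PySem.List.pyGetD st cj.1 (1, 0, -1)).2.1 + (pvPg cur "book_page" - pvPg cj.2 "book_page"),
   cj.1)

def pvOptB (cur : List (String × Int)) (t : Int × Int × List (List (String × Int))) :
    Int × Int × List (List (String × Int)) :=
  (t.1 + 1, t.2.1 + (pvPg cur "book_page" - pvPg (PySem.List.pyGetD t.2.2 (-1) []) "book_page"), t.2.2)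

def pvPick2A {γ : Type} (acc t : Int × Int × γ) : Int × Int × γ :=
  if t.1 > acc.1 ∨ (t.1 = acc.1 ∧ t.2.1 > acc.2.1) then t else acc

lemma pvAccA_eq (st : List (Int × Int × Int)) (cur : List (String × Int))
    (cj : Int × List (String × Int)) (acc : Int × Int × Int) :
    pvAccA st cur cj acc = if pvValidB cur cj.2 then pvPick2A acc (pvOptA st cur cj) else acc := by
  unfold pvAccA pvValidB pvOptA pvPick2A
  by_cases h1 : pvPg cj.2 "pdf_page" ≥ pvPg cur "pdf_page"
  · simp [h1, not_lt.2 h1]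
  · by_cases h2 : pvPg cj.2 "book_page" ≥ pvPg cur "book_page"
    · simp [h1, h2, not_lt.2 h2]
    · by_cases h3 : pvPg cur "pdf_page" - pvPg cj.2 "pdf_page" > max 18 ((pvPg cur "book_page" - pvPg cj.2 "book_page") * 5)
      · simp [h1, h2, h3, not_le.2 h3]
      · have v1 := not_le.mp h1
        have v2 := not_le.mp h2
        have v3 := not_lt.mp h3
        simp [h1, h2, h3, v1, v2, v3]

lemma pvFoldlGuard {α γ : Type} (p : α → Bool) (g : γ → α → γ) :
    ∀ (l : List α) (acc : γ),
      l.foldl (fun acc x => if p x then g acc x else acc) acc = (l.filter p).foldl g acc := by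
  intro l
  induction l with
  | nil => intro acc; rfl
  | cons x t ih => intro acc; cases hp : p x <;> simp [hp, ih]

lemma pvFoldlRel {α β γ δ : Type} (R : γ → δ → Prop) (Q : α → β → Prop)
    (fA : γ → α → γ) (fB : δ → β → δ)
    (hstep : ∀ a b x y, R a b → Q x y → R (fA a x) (fB b y)) :
    ∀ {la : List α} {lb : List β}, List.Forall₂ Q la lb →
      ∀ {a : γ} {b : δ}, R a b → R (la.foldl fA a) (lb.foldl fB b) := by
  intro la lb h
  induction h with
  | nil => intro a b hab; exact hab
  | cons hq _ ih => intro a b hab; exact ih (hstep _ _ _ _ hab hq)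

lemma pvForall₂FilterMap {α β γ δ : Type} (Q : α → β → Prop) (R : γ → δ → Prop)
    (p : α → Bool) (q : β → Bool) (f : α → γ) (g : β → δ)
    (hiff : ∀ a b, Q a b → p a = q b) (hmap : ∀ a b, Q a b → p a = true → R (f a) (g b)) :
    ∀ {la : List α} {lb : List β}, List.Forall₂ Q la lb →
      List.Forall₂ R ((la.filter p).map f) ((lb.filter q).map g) := by
  intro la lb h
  induction h with
  | nil => exact List.Forall₂.nil
  | @cons x y la' lb' hq _ ih =>
    have hpq := hiff _ _ hq
    cases hp : p x with
    | false =>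
      have hq2 : q y = false := by rw [← hpq]; exact hp
      simpa [List.filter_cons, hp, hq2] using ih
    | true =>
      have hq2 : q y = true := by rw [← hpq]; exact hp
      simpa [List.filter_cons, hp, hq2] using List.Forall₂.cons (hmap _ _ hq hp) ih

lemma pvGetDLast {α : Type} (l : List α) (x d : α) :
    PySem.List.pyGetD (l ++ [x]) (-1) d = x := by
  simp [PySem.List.pyGetD, PySem.List.pyGet?, PySem.List.pyIdx?]

lemma pvWalk_neg_one (ordered : List (List (String × Int))) (st : List (Int × Int × Int)) :
    ∀ fuel, pvWalk ordered st fuel (-1) = [] := by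
  intro fuel; cases fuel <;> simp [pvWalk]

lemma pvWalk_append (ordered : List (List (String × Int))) (st : List (Int × Int × Int))
    (x : Int × Int × Int)
    (hprops : ∀ k (hk : k < st.length), -1 ≤ st[k].2.2 ∧ st[k].2.2 < (k : Int)) :
    ∀ (fuel : Nat) (i : Int), -1 ≤ i → i < (st.length : Int) →
      pvWalk ordered (st ++ [x]) fuel i = pvWalk ordered st fuel i := by
  intro fuel
  induction fuel with
  | zero => intro i _ _; rfl
  | succ n ih =>
    intro i h1 h2
    by_cases hi : i = -1
    · simp [pvWalk, hi]
    · have h0 : 0 ≤ i := by omega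
      have hlt : i.toNat < st.length := by omega
      have hget : PySem.List.pyGetD (st ++ [x]) i (1, 0, -1) = st[i.toNat] := by
        rw [PySem.List.pyGetD_eq_getElem _ _ h0 (by simp; omega)]
        exact List.getElem_append_left _
      have hget' : PySem.List.pyGetD st i (1, 0, -1) = st[i.toNat] :=
        PySem.List.pyGetD_eq_getElem _ _ h0 (by omega)
      have hp := hprops i.toNat hlt
      simp only [pvWalk, if_neg hi, hget, hget']
      rw [ih _ hp.1 (by omega)]

lemma pvWalk_fuel (ordered : List (List (String × Int))) (st : List (Int × Int × Int))
    (hprops : ∀ k (hk : k < st.length), -1 ≤ st[k].2.2 ∧ st[k].2.2 < (k : Int)) :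
    ∀ (k : Nat) (i : Int) (fuel fuel' : Nat), i ≤ (k : Int) → -1 ≤ i → i < (st.length : Int) →
      i.toNat < fuel → i.toNat < fuel' →
      pvWalk ordered st fuel i = pvWalk ordered st fuel' i := by
  intro k
  induction k with
  | zero =>
    intro i fuel fuel' hk h1 h2 hf hf'
    by_cases hi : i = -1
    · rw [hi, pvWalk_neg_one, pvWalk_neg_one]
    · have h0 : i = 0 := by omega
      obtain ⟨a, rfl⟩ : ∃ a, fuel = a + 1 := ⟨fuel - 1, by omega⟩
      obtain ⟨b, rfl⟩ : ∃ b, fuel' = b + 1 := ⟨fuel' - 1, by omega⟩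
      have hget : PySem.List.pyGetD st i (1, 0, -1) = st[i.toNat] :=
        PySem.List.pyGetD_eq_getElem _ _ (by omega) h2
      have hp := hprops i.toNat (by omega)
      have hprev : st[i.toNat].2.2 = -1 := by omega
      simp only [pvWalk, if_neg hi, hget, hprev, pvWalk_neg_one]
    | succ n ih =>
      intro i fuel fuel' hk h1 h2 hf hf'
      by_cases hi : i = -1
      · rw [hi, pvWalk_neg_one, pvWalk_neg_one]
      · obtain ⟨a, rfl⟩ : ∃ a, fuel = a + 1 := ⟨fuel - 1, by omega⟩
        obtain ⟨b, rfl⟩ : ∃ b, fuel' = b + 1 := ⟨fuel' - 1, by omega⟩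
        have hget : PySem.List.pyGetD st i (1, 0, -1) = st[i.toNat] :=
          PySem.List.pyGetD_eq_getElem _ _ (by omega) h2
        have hp := hprops i.toNat (by omega)
        simp only [pvWalk, if_neg hi, hget]
        by_cases hprev : st[i.toNat].2.2 = -1
        · rw [hprev, pvWalk_neg_one, pvWalk_neg_one]
        · rw [ih st[i.toNat].2.2 a b (by omega) hp.1 (by omega) (by omega) (by omega)]

-- the loop invariant: st (A's finalized (length, span, prev) triples) and ch (the bridge
-- fold's chains) describe the same DP state; each stored chain is A's backward walk, reversed
def pvInv (ordered : List (List (String × Int))) (st : List (Int × Int × Int))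
    (ch : List (Int × Int × List (List (String × Int)))) : Prop :=
  st.length = ch.length ∧ st.length ≤ ordered.length ∧
  ∀ k (hk : k < st.length) (hk2 : k < ch.length),
    st[k].1 = ch[k].1 ∧ st[k].2.1 = ch[k].2.1 ∧ 1 ≤ st[k].1 ∧
    -1 ≤ st[k].2.2 ∧ st[k].2.2 < (k : Int) ∧
    ch[k].2.2 = (pvWalk ordered st (k + 1) (k : Int)).reverse

lemma pvChainLast (ordered : List (List (String × Int))) (st : List (Int × Int × Int))
    (ch : List (Int × Int × List (List (String × Int)))) (hinv : pvInv ordered st ch)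
    (k : Nat) (hk : k < st.length) (hk2 : k < ch.length) (hko : k < ordered.length) :
    PySem.List.pyGetD ch[k].2.2 (-1) [] = ordered[k] := by
  obtain ⟨_, _, _, _, _, hw⟩ := hinv.2.2 k hk hk2
  have hne : (k : Int) ≠ -1 := by omega
  have hstep : pvWalk ordered st (k + 1) (k : Int)
      = PySem.List.pyGetD ordered (k : Int) []
        :: pvWalk ordered st k (PySem.List.pyGetD st (k : Int) (1, 0, -1)).2.2 := by
    rw [pvWalk, if_neg hne]
  rw [hw, hstep, List.reverse_cons, pvGetDLast]
  exact PySem.List.pyGetD_eq_getElem _ _ (by omega) (by omega)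

lemma pvOptionsEq (cur : List (String × Int)) :
    ∀ (chains : List (Int × Int × List (List (String × Int))))
      (acc : List (Int × Int × List (List (String × Int)))),
      chains.foldl (fun opts t =>
        if pvPg (PySem.List.pyGetD t.2.2 (-1) []) "pdf_page" < pvPg cur "pdf_page" ∧
            pvPg (PySem.List.pyGetD t.2.2 (-1) []) "book_page" < pvPg cur "book_page" ∧
            pvPg cur "pdf_page" - pvPg (PySem.List.pyGetD t.2.2 (-1) []) "pdf_page" ≤
              max 18 ((pvPg cur "book_page" - pvPg (PySem.List.pyGetD t.2.2 (-1) []) "book_page") * 5)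
        then opts ++ [(t.1 + 1,
          t.2.1 + (pvPg cur "book_page" - pvPg (PySem.List.pyGetD t.2.2 (-1) []) "book_page"), t.2.2)]
        else opts) acc
      = acc ++ (chains.filter fun t =>
          pvValidB cur (PySem.List.pyGetD t.2.2 (-1) [])).map (pvOptB cur) := by
  intro chains
  induction chains with
  | nil => intro acc; simp
  | cons t ts ih =>
    intro acc
    rw [List.foldl_cons, List.filter_cons]
    by_cases h : pvPg (PySem.List.pyGetD t.2.2 (-1) []) "pdf_page" < pvPg cur "pdf_page" ∧
        pvPg (PySem.List.pyGetD t.2.2 (-1) []) "book_page" < pvPg cur "book_page" ∧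
        pvPg cur "pdf_page" - pvPg (PySem.List.pyGetD t.2.2 (-1) []) "pdf_page" ≤
          max 18 ((pvPg cur "book_page" - pvPg (PySem.List.pyGetD t.2.2 (-1) []) "book_page") * 5)
    · have hb : pvValidB cur (PySem.List.pyGetD t.2.2 (-1) []) = true := by
        simp only [pvValidB, decide_eq_true_eq]; exact h
      rw [if_pos h, hb, ih]
      simp [pvOptB]
    · have hb : pvValidB cur (PySem.List.pyGetD t.2.2 (-1) []) = false := by
        simp only [pvValidB, decide_eq_false_iff_not]; exact h
      rw [if_neg h, hb, ih]
      simp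

lemma pvInvExtend (ordered : List (List (String × Int))) (st : List (Int × Int × Int))
    (ch : List (Int × Int × List (List (String × Int)))) (hinv : pvInv ordered st ch)
    (hi : st.length < ordered.length)
    (e : Int × Int × Int) (c : Int × Int × List (List (String × Int)))
    (h1 : e.1 = c.1) (h2 : e.2.1 = c.2.1) (h3 : 1 ≤ e.1) (h4 : -1 ≤ e.2.2)
    (h5 : e.2.2 < (st.length : Int))
    (h6 : c.2.2 = (pvWalk ordered (st ++ [e]) (st.length + 1) (st.length : Int)).reverse) :
    pvInv ordered (st ++ [e]) (ch ++ [c]) := by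
  obtain ⟨hlen, hle, hk⟩ := hinv
  have hprops : ∀ k (hk' : k < st.length), -1 ≤ st[k].2.2 ∧ st[k].2.2 < (k : Int) := by
    intro k hk'
    obtain ⟨_, _, _, p4, p5, _⟩ := hk k hk' (by omega)
    exact ⟨p4, p5⟩
  refine ⟨by simp [hlen], by simp; omega, ?_⟩
  intro k hk' hk2'
  simp only [List.length_append, List.length_singleton] at hk' hk2'
  by_cases hcase : k < st.length
  · have ha : (st ++ [e])[k] = st[k] := List.getElem_append_left _
    have hb : (ch ++ [c])[k] = ch[k] := List.getElem_append_left (by omega)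
    obtain ⟨p1, p2, p3, p4, p5, p6⟩ := hk k hcase (by omega)
    refine ⟨by rw [ha, hb]; exact p1, by rw [ha, hb]; exact p2, by rw [ha]; exact p3,
      by rw [ha]; exact p4, by rw [ha]; exact p5, ?_⟩
    rw [hb, p6, pvWalk_append ordered st e hprops (k + 1) (k : Int) (by omega) (by omega)]
  · have hke : k = st.length := by omega
    subst hke
    have ha : (st ++ [e])[st.length] = e := List.getElem_concat_length rfl _
    have hb : (ch ++ [c])[st.length] = c := List.getElem_concat_length hlen _
    rw [ha, hb]
    exact ⟨h1, h2, h3, h4, h5, h6⟩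

lemma pvStep (ordered : List (List (String × Int))) (st : List (Int × Int × Int))
    (ch : List (Int × Int × List (List (String × Int)))) (i : Nat)
    (hinv : pvInv ordered st ch) (hleni : st.length = i) (hi : i < ordered.length) :
    pvInv ordered (pvStepA ordered st ((i : Int), ordered[i])) (pvStepB ch ordered[i]) := by
  obtain ⟨hlen, hle, hk⟩ := hinv
  have hprops : ∀ k (hk' : k < st.length), -1 ≤ st[k].2.2 ∧ st[k].2.2 < (k : Int) := by
    intro k hk'
    obtain ⟨_, _, _, p4, p5, _⟩ := hk k hk' (by omega)
    exact ⟨p4, p5⟩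
  set cur := ordered[i] with hcur
  -- rewrite A's inner fold into a pick-fold over the mapped filtered option list
  have hsl : PySem.List.slice ordered none (some (i : Int)) = ordered.take i := by
    rw [PySem.List.slice_to ordered (by omega)]; simp
  have heA : pvStepA ordered st ((i : Int), cur)
      = st ++ [(((PySem.List.enumerate (ordered.take i)).filter
            (fun cj => pvValidB cur cj.2)).map (pvOptA st cur)).foldl pvPick2A (1, 0, -1)] := by
    unfold pvStepA
    simp only [hsl]
    rw [show ∀ (l : List (Int × List (String × Int))) (a : Int × Int × Int),
        l.foldl (fun acc cj => pvAccA st cur cj acc) a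
          = l.foldl (fun acc cj => if pvValidB cur cj.2 then pvPick2A acc (pvOptA st cur cj) else acc) a from
      fun l a => by simp only [pvAccA_eq]]
    rw [pvFoldlGuard (fun cj => pvValidB cur cj.2) (fun acc cj => pvPick2A acc (pvOptA st cur cj))]
    rw [← List.foldl_map]
  -- the base Forall₂ between A's enumerated prefix and the bridge chain list
  have hQ : List.Forall₂ (fun (cj : Int × List (String × Int))
      (t : Int × Int × List (List (String × Int))) =>
      ∃ (k : Nat) (hk2 : k < ch.length) (hk3 : k < ordered.length), k < st.length ∧
        cj.1 = (k : Int) ∧ cj.2 = ordered[k] ∧ t = ch[k])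
      (PySem.List.enumerate (ordered.take i)) ch := by
    rw [List.forall₂_iff_get]
    constructor
    · simp [PySem.List.length_enumerate]; omega
    · intro k h1 h2
      have hkst : k < st.length := by
        simp [PySem.List.length_enumerate] at h1; omega
      have hko : k < ordered.length := by omega
      refine ⟨k, by omega, hko, hkst, ?_, ?_, ?_⟩
      · simp [List.get_eq_getElem, PySem.List.getElem_enumerate]
      · simp [List.get_eq_getElem, PySem.List.getElem_enumerate, List.getElem_take]
      · simp [List.get_eq_getElem]
  -- filtered-and-mapped option lists are pointwise related
  have hF := pvForall₂FilterMap _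
      (fun (a : Int × Int × Int) (b : Int × Int × List (List (String × Int))) =>
        a.1 = b.1 ∧ a.2.1 = b.2.1 ∧ 2 ≤ a.1 ∧ 0 ≤ a.2.2 ∧ a.2.2 < (st.length : Int) ∧
          b.2.2 = (pvWalk ordered st st.length a.2.2).reverse)
      (fun cj => pvValidB cur cj.2)
      (fun t => pvValidB cur (PySem.List.pyGetD t.2.2 (-1) []))
      (pvOptA st cur) (pvOptB cur)
      (by
        rintro cj t ⟨k, hk2, hk3, hkst, e1, e2, e3⟩
        show pvValidB cur cj.2 = pvValidB cur (PySem.List.pyGetD t.2.2 (-1) [])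
        rw [e2, e3, pvChainLast ordered st ch ⟨hlen, hle, hk⟩ k hkst hk2 hk3])
      (by
        rintro cj t ⟨k, hk2, hk3, hkst, e1, e2, e3⟩ _
        obtain ⟨p1, p2, p3, p4, p5, p6⟩ := hk k hkst hk2
        have hgd : PySem.List.pyGetD st cj.1 (1, 0, -1) = st[k] := by
          rw [e1, PySem.List.pyGetD_natCast, List.getD_eq_getElem st _ hkst]
        have hlast : PySem.List.pyGetD ch[k].2.2 (-1) [] = ordered[k] :=
          pvChainLast ordered st ch ⟨hlen, hle, hk⟩ k hkst hk2 hk3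
        refine ⟨?_, ?_, ?_, ?_, ?_, ?_⟩
        · simp [pvOptA, pvOptB, hgd, e3, p1]
        · simp [pvOptA, pvOptB, hgd, e3, e2, hlast, p2]
        · simp [pvOptA, hgd]; omega
        · simp [pvOptA, e1]
        · simp [pvOptA, e1]; omega
        · simp only [pvOptA, pvOptB, e3, e1]
          rw [p6, pvWalk_fuel ordered st hprops k (k : Int) (k + 1) st.length (by omega)
            (by omega) (by omega) (by omega) (by omega)])
      hQ
  -- the bridge's step, with its options fold rewritten
  have heB : pvStepB ch cur
      = (match (ch.filter fun t => pvValidB cur (PySem.List.pyGetD t.2.2 (-1) [])).map (pvOptB cur) with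
        | [] => ch ++ [(1, 0, [cur])]
        | o :: rest =>
          let best := rest.foldl (fun best opt =>
            if pvLex2 (best.1, best.2.1) (opt.1, opt.2.1) then opt else best) o
          ch ++ [(best.1, best.2.1, best.2.2 ++ [cur])]) := by
    unfold pvStepB
    rw [pvOptionsEq cur ch []]
    simp
  rw [heA, heB]
  -- case split on whether any predecessor is admissible
  cases hLA : List.map (pvOptA st cur)
      (List.filter (fun cj => pvValidB cur cj.2) (PySem.List.enumerate (List.take i ordered))) with
  | nil =>
    have hLB : List.map (pvOptB cur)
        (List.filter (fun t => pvValidB cur (PySem.List.pyGetD t.2.2 (-1) [])) ch) = [] :=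
      List.forall₂_nil_left_iff.mp (hLA ▸ hF)
    rw [hLB]
    simp only [List.foldl_nil]
    apply pvInvExtend ordered st ch ⟨hlen, hle, hk⟩ (by omega) _ _ rfl rfl (by norm_num)
      (by norm_num) (by simp; omega)
    have hne : (st.length : Int) ≠ -1 := by omega
    have hgete : PySem.List.pyGetD (st ++ [((1 : Int), (0 : Int), (-1 : Int))]) (st.length : Int)
        (1, 0, -1) = ((1 : Int), (0 : Int), (-1 : Int)) := by
      rw [PySem.List.pyGetD_eq_getElem _ _ (by omega) (by simp)]
      exact List.getElem_concat_length rfl _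
    rw [pvWalk, if_neg hne, hgete]
    simp only [pvWalk_neg_one, List.reverse_cons, List.reverse_nil, List.nil_append]
    rw [PySem.List.pyGetD_eq_getElem _ _ (by omega) (by omega)]
    simp [hleni]
    exact hcur
  | cons x restA =>
    obtain ⟨y, restB, hxy, hrest, hBeq⟩ := List.forall₂_cons_left_iff.mp (hLA ▸ hF)
    rw [hBeq]
    have hres := pvFoldlRel (fun (a : Int × Int × Int) (b : Int × Int × List (List (String × Int))) =>
        a.1 = b.1 ∧ a.2.1 = b.2.1 ∧ 2 ≤ a.1 ∧ 0 ≤ a.2.2 ∧ a.2.2 < (st.length : Int) ∧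
          b.2.2 = (pvWalk ordered st st.length a.2.2).reverse) (fun (a : Int × Int × Int) (b : Int × Int × List (List (String × Int))) =>
        a.1 = b.1 ∧ a.2.1 = b.2.1 ∧ 2 ≤ a.1 ∧ 0 ≤ a.2.2 ∧ a.2.2 < (st.length : Int) ∧
          b.2.2 = (pvWalk ordered st st.length a.2.2).reverse) pvPick2A
      (fun best opt => if pvLex2 (best.1, best.2.1) (opt.1, opt.2.1) then opt else best)
      (by
        rintro a b x' y' ⟨q1, q2, q3, q4, q5, q6⟩ ⟨r1, r2, r3, r4, r5, r6⟩
        have hcond : (pvLex2 (b.1, b.2.1) (y'.1, y'.2.1) = true)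
            ↔ (x'.1 > a.1 ∨ (x'.1 = a.1 ∧ x'.2.1 > a.2.1)) := by
          simp only [pvLex2, Bool.or_eq_true, Bool.and_eq_true, decide_eq_true_eq, beq_iff_eq]
          rw [← q1, ← q2, ← r1, ← r2]
          omega
        dsimp only
        unfold pvPick2A
        by_cases hc : x'.1 > a.1 ∨ (x'.1 = a.1 ∧ x'.2.1 > a.2.1)
        · rw [if_pos hc, if_pos (hcond.mpr hc)]
          exact ⟨r1, r2, r3, r4, r5, r6⟩
        · rw [if_neg hc, if_neg (fun hb => hc (hcond.mp hb))]
          exact ⟨q1, q2, q3, q4, q5, q6⟩)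
      hrest hxy
    have hfirst : pvPick2A (1, 0, -1) x = x := by
      unfold pvPick2A
      rw [if_pos]
      left
      have := hxy.2.2.1
      omega
    simp only [List.foldl_cons, hfirst]
    obtain ⟨w1, w2, w3, w4, w5, w6⟩ := hres
    set eA := restA.foldl pvPick2A x with heAdef
    set eB := restB.foldl
      (fun best opt => if pvLex2 (best.1, best.2.1) (opt.1, opt.2.1) then opt else best) y with heBdef
    apply pvInvExtend ordered st ch ⟨hlen, hle, hk⟩ (by omega) eA (eB.1, eB.2.1, eB.2.2 ++ [cur])
      w1 w2 (by omega) (by omega) (by omega)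
    have hne : (st.length : Int) ≠ -1 := by omega
    have hgete : PySem.List.pyGetD (st ++ [eA]) (st.length : Int) (1, 0, -1) = eA := by
      rw [PySem.List.pyGetD_eq_getElem _ _ (by omega) (by simp)]
      exact List.getElem_concat_length rfl _
    rw [pvWalk, if_neg hne, hgete]
    rw [pvWalk_append ordered st eA hprops st.length eA.2.2 (by omega) (by omega)]
    rw [List.reverse_cons, ← w6]
    rw [PySem.List.pyGetD_eq_getElem _ _ (by omega) (by omega)]
    simp [hleni]
    exact hcur

lemma pvLoop (ordered : List (List (String × Int))) :
    ∀ i, i ≤ ordered.length →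
      pvInv ordered ((PySem.List.enumerate (ordered.take i)).foldl (pvStepA ordered) [])
        ((ordered.take i).foldl pvStepB [])
      ∧ ((PySem.List.enumerate (ordered.take i)).foldl (pvStepA ordered) []).length = i := by
  intro i
  induction i with
  | zero =>
    intro _
    refine ⟨⟨rfl, by simp, ?_⟩, rfl⟩
    intro k hk _
    simp at hk
  | succ m ih =>
    intro h
    obtain ⟨hinv, hlenm⟩ := ih (by omega)
    have hm : m < ordered.length := by omega
    have htake : ordered.take (m + 1) = ordered.take m ++ [ordered[m]] := by
      rw [List.take_add_one, List.getElem?_eq_getElem hm]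
      rfl
    have hlent : (ordered.take m).length = m := by simp; omega
    rw [htake, PySem.List.enumerate_append, List.foldl_append, List.foldl_append]
    have hone : PySem.List.enumerate [ordered[m]] ((0 : Int) + ((ordered.take m).length : Int))
        = [((m : Int), ordered[m])] := by
      rw [PySem.List.enumerate_cons]
      simp [hlent]
    rw [hone]
    simp only [List.foldl_cons, List.foldl_nil]
    refine ⟨pvStep ordered _ _ m hinv hlenm hm, ?_⟩
    simp [pvStepA, hlenm]

lemma pvSelRel (ch : List (Int × Int × List (List (String × Int))))
    (keyA : Int → Int × Int × Int)
    (hkey : ∀ (k : Nat), k < ch.length → keyA (k : Int) = pvKeyB (ch.getD k (0, 0, []))) :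
    ∀ (d : Nat) (m : Nat) (b : Int), ch.length - m ≤ d → 0 ≤ b → b < (ch.length : Int) →
      (0 ≤ (PySem.List.pyRange (m : Int) (ch.length : Int) 1).foldl
          (fun b idx => if pvLex3 (keyA b) (keyA idx) then idx else b) b
      ∧ (PySem.List.pyRange (m : Int) (ch.length : Int) 1).foldl
          (fun b idx => if pvLex3 (keyA b) (keyA idx) then idx else b) b < (ch.length : Int)
      ∧ (ch.drop m).foldl (fun w t => if pvLex3 (pvKeyB w) (pvKeyB t) then t else w)
          (ch.getD b.toNat (0, 0, []))
        = ch.getD ((PySem.List.pyRange (m : Int) (ch.length : Int) 1).foldl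
            (fun b idx => if pvLex3 (keyA b) (keyA idx) then idx else b) b).toNat (0, 0, [])) := by
  intro d
  induction d with
  | zero =>
    intro m b hd h0 hb
    have hge : (ch.length : Int) ≤ (m : Int) := by omega
    have hr : PySem.List.pyRange (m : Int) (ch.length : Int) 1 = [] := by
      simp [PySem.List.pyRange]
      intro h'
      omega
    have hdrop : ch.drop m = [] := List.drop_eq_nil_of_le (by omega)
    rw [hr, hdrop]
    exact ⟨h0, hb, rfl⟩
  | succ d ih =>
    intro m b hd h0 hb
    by_cases hm : m < ch.length
    · have hcons : PySem.List.pyRange (m : Int) (ch.length : Int) 1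
          = (m : Int) :: PySem.List.pyRange ((m : Int) + 1) (ch.length : Int) 1 :=
        PySem.List.pyRange_one_cons (by omega)
      have hdrop : ch.drop m = ch[m] :: ch.drop (m + 1) := List.drop_eq_getElem_cons hm
      rw [hcons, hdrop]
      simp only [List.foldl_cons]
      have hkb : keyA b = pvKeyB (ch.getD b.toNat (0, 0, [])) := by
        have : b = ((b.toNat : Nat) : Int) := by omega
        rw [this]
        exact hkey b.toNat (by omega)
      have hkm : keyA (m : Int) = pvKeyB ch[m] := by
        rw [hkey m hm, List.getD_eq_getElem ch _ hm]
      have hgm : ch.getD m (0, 0, []) = ch[m] := List.getD_eq_getElem ch _ hm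
      by_cases hc : pvLex3 (keyA b) (keyA (m : Int)) = true
      · rw [if_pos hc]
        have hc' : pvLex3 (pvKeyB (ch.getD b.toNat (0, 0, []))) (pvKeyB ch[m]) = true := by
          rw [← hkb, ← hkm]; exact hc
        rw [if_pos hc']
        rw [show ((m : Int) + 1) = ((m + 1 : Nat) : Int) by omega]
        have := ih (m + 1) (m : Int) (by omega) (by omega) (by omega)
        rw [show ((m : Int)).toNat = m by omega, hgm] at this
        exact this
      · rw [if_neg hc]
        have hc' : ¬ pvLex3 (pvKeyB (ch.getD b.toNat (0, 0, []))) (pvKeyB ch[m]) = true := by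
          rw [← hkb, ← hkm]; exact hc
        rw [if_neg hc']
        rw [show ((m : Int) + 1) = ((m + 1 : Nat) : Int) by omega]
        exact ih (m + 1) b (by omega) h0 hb
    · have hr : PySem.List.pyRange (m : Int) (ch.length : Int) 1 = [] := by
        simp [PySem.List.pyRange]
        intro h'
        omega
      have hdrop : ch.drop m = [] := List.drop_eq_nil_of_le (by omega)
      rw [hr, hdrop]
      exact ⟨h0, hb, rfl⟩

-- ===== bridging B's recursion to the bridge fold =====

lemma pvStepB_shape (c : List (Int × Int × List (List (String × Int))))
    (x : List (String × Int)) : ∃ t, pvStepB c x = c ++ [t] := by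
  unfold pvStepB
  dsimp only
  split
  · exact ⟨_, rfl⟩
  · exact ⟨_, rfl⟩

lemma pvFoldlStepB_prefix : ∀ (l : List (List (String × Int)))
    (c : List (Int × Int × List (List (String × Int)))), c <+: l.foldl pvStepB c := by
  intro l
  induction l with
  | nil => intro c; exact List.prefix_rfl
  | cons x t ih =>
    intro c
    obtain ⟨e, he⟩ := pvStepB_shape c x
    calc c <+: c ++ [e] := List.prefix_append c [e]
      _ = pvStepB c x := he.symm
      _ <+: (x :: t).foldl pvStepB c := by rw [List.foldl_cons]; exact ih _

lemma pvChainsPrefix (ordered : List (List (String × Int))) (i : Nat) :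
    (ordered.take i).foldl pvStepB [] <+: ordered.foldl pvStepB [] := by
  conv_rhs => rw [← List.take_append_drop i ordered]
  rw [List.foldl_append]
  exact pvFoldlStepB_prefix _ _

lemma pvChainsLen (ordered : List (List (String × Int))) (i : Nat) (hi : i ≤ ordered.length) :
    ((ordered.take i).foldl pvStepB []).length = i := by
  obtain ⟨hinv, hlen⟩ := pvLoop ordered i hi
  rw [← hinv.1, hlen]

-- index version of the filtered option list: filtering a list equals filtering its indices
lemma pvFilterMapIndex {α β : Type} (d : α) (f : α → β) :
    ∀ (l : List α) (p : Nat → Bool) (q : α → Bool),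
      (∀ j (h : j < l.length), q l[j] = p j) →
      (l.filter q).map f = ((List.range l.length).filter p).map (fun j => f (l.getD j d)) := by
  intro l
  induction l with
  | nil => intro p q _; simp
  | cons a tl ih =>
    intro p q hq
    have h0 := hq 0 (by simp)
    simp only [List.getElem_cons_zero] at h0
    have hrange : List.range (a :: tl).length = 0 :: (List.range tl.length).map (· + 1) := by
      simp [List.range_succ_eq_map]
    rw [hrange]
    have htl := ih (fun j => p (j + 1)) q (by
      intro j h
      have := hq (j + 1) (by simp; omega)
      simpa using this)
    rw [List.filter_cons, List.filter_cons]
    have hmapfilter : ((List.range tl.length).map (· + 1)).filter p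
        = ((List.range tl.length).filter (fun j => p (j + 1))).map (· + 1) := by
      rw [List.filter_map]
      rfl
    cases hqa : q a with
    | false =>
      have hp0 : p 0 = false := h0 ▸ hqa
      simp only [hp0, Bool.false_eq_true, if_false]
      rw [htl, hmapfilter, List.map_map]
      rfl
    | true =>
      have hp0 : p 0 = true := h0 ▸ hqa
      simp only [hp0, if_true, List.map_cons]
      rw [htl, hmapfilter, List.map_map]
      rfl

-- a first-max fold commutes with a map that preserves the compared components
lemma pvFoldMaxMap (cur : List (String × Int)) :
    ∀ (l : List (Int × Int × List (List (String × Int))))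
      (o : Int × Int × List (List (String × Int))),
      ((l.map (fun t => (t.1, t.2.1, t.2.2 ++ [cur]))).foldl
        (fun b t => if pvLex2 (b.1, b.2.1) (t.1, t.2.1) then t else b)
        (o.1, o.2.1, o.2.2 ++ [cur]))
      = (fun t => (t.1, t.2.1, t.2.2 ++ [cur]))
          (l.foldl (fun b t => if pvLex2 (b.1, b.2.1) (t.1, t.2.1) then t else b) o) := by
  intro l
  induction l with
  | nil => intro o; rfl
  | cons x tl ih =>
    intro o
    simp only [List.map_cons, List.foldl_cons]
    by_cases hc : pvLex2 (o.1, o.2.1) (x.1, x.2.1) = true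
    · rw [if_pos hc, if_pos hc, ih]
    · rw [if_neg hc, if_neg hc, ih]

-- B's recursion computes exactly the bridge fold's k-th entry
lemma pvChain_eq_fold (ordered : List (List (String × Int))) :
    ∀ i, i < ordered.length →
      pvChain ordered i = (ordered.foldl pvStepB []).getD i (0, 0, []) := by
  intro i
  induction i using Nat.strong_induction_on with
  | _ i ih =>
    intro hi
    set ch := ordered.foldl pvStepB [] with hch
    set chi := (ordered.take i).foldl pvStepB [] with hchi
    have hleni : chi.length = i := pvChainsLen ordered i (by omega)
    have hlenn : ch.length = ordered.length := by
      have := pvChainsLen ordered ordered.length (le_refl _)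
      rwa [List.take_length] at this
    -- ch[i] is the element appended by pvStepB chi ordered[i]
    have htake : ordered.take (i + 1) = ordered.take i ++ [ordered[i]] := by
      rw [List.take_add_one, List.getElem?_eq_getElem hi]
      rfl
    have hchsucc : (ordered.take (i + 1)).foldl pvStepB [] = pvStepB chi ordered[i] := by
      rw [htake, List.foldl_append]
      rfl
    have hprefsucc : pvStepB chi ordered[i] <+: ch := by
      rw [← hchsucc]; exact pvChainsPrefix ordered (i + 1)
    have hpref : chi <+: ch := pvChainsPrefix ordered i
    -- invariant of the full run, for pvChainLast
    have hfull := (pvLoop ordered ordered.length (le_refl _)).1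
    rw [List.take_length] at hfull
    set st := (PySem.List.enumerate ordered).foldl (pvStepA ordered) [] with hst
    have hstlen : st.length = ch.length := hfull.1
    -- element access through prefixes
    have hchiget : ∀ j (h : j < i), chi.getD j (0, 0, []) = ch.getD j (0, 0, []) := by
      intro j h
      obtain ⟨s, hs⟩ := hpref
      rw [← hs]
      rw [List.getD_eq_getElem _ _ (by omega), List.getD_eq_getElem _ _ (by rw [List.length_append]; omega)]
      exact (List.getElem_append_left (by omega)).symm
    set cur := ordered[i] with hcur
    have hcurget : PySem.List.pyGetD ordered (i : Int) [] = cur := by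
      rw [PySem.List.pyGetD_natCast, List.getD_eq_getElem _ _ hi]
    -- unfold B's recursion once
    rw [pvChain]
    simp only [hcurget]
    -- replace the dite-map by the bridge entries, via IH and the prefix facts
    have hmapIH : ((List.range i).filter
          (fun (j : Nat) => pvLinks (PySem.List.pyGetD ordered (j : Int) []) cur)).map
          (fun j => if h : j < i then pvChain ordered j else (0, 0, []))
        = ((List.range i).filter
          (fun (j : Nat) => pvLinks (PySem.List.pyGetD ordered (j : Int) []) cur)).map
          (fun j => chi.getD j (0, 0, [])) := by
      apply List.map_congr_left
      intro j hj
      have hjr : j < i := List.mem_range.mp (List.mem_of_mem_filter hj)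
      rw [dif_pos hjr, ih j hjr (by omega), hchiget j hjr]
    rw [hmapIH]
    -- the filtered index list equals the filtered chain list (keys agree via pvChainLast)
    have hidx : (chi.filter (fun t => pvValidB cur (PySem.List.pyGetD t.2.2 (-1) []))).map
          (fun t => t)
        = ((List.range chi.length).filter
            (fun (j : Nat) => pvLinks (PySem.List.pyGetD ordered (j : Int) []) cur)).map
          (fun j => chi.getD j (0, 0, [])) := by
      apply pvFilterMapIndex (0, 0, []) (fun t => t) chi
        (fun (j : Nat) => pvLinks (PySem.List.pyGetD ordered (j : Int) []) cur)
      intro j h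
      have hj : j < i := by omega
      have hcj : chi[j] = ch[j] := by
        have := hchiget j hj
        rwa [List.getD_eq_getElem _ _ h, List.getD_eq_getElem _ _ (by omega)] at this
      have hlast : PySem.List.pyGetD ch[j].2.2 (-1) [] = ordered[j] :=
        pvChainLast ordered st ch hfull j (by omega) (by omega) (by omega)
      rw [hcj, pvLinks_eq_valid, hlast]
      congr 1
      rw [PySem.List.pyGetD_natCast, List.getD_eq_getElem _ _ (by omega)]
    rw [List.map_id'] at hidx
    rw [hleni] at hidx
    rw [← hidx]
    -- now compare with the bridge step: its options list is the filtered-mapped chain list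
    have hoptB : pvStepB chi cur
        = (match (chi.filter fun t => pvValidB cur (PySem.List.pyGetD t.2.2 (-1) [])).map (pvOptB cur) with
          | [] => chi ++ [(1, 0, [cur])]
          | o :: rest =>
            let best := rest.foldl (fun best opt =>
              if pvLex2 (best.1, best.2.1) (opt.1, opt.2.1) then opt else best) o
            chi ++ [(best.1, best.2.1, best.2.2 ++ [cur])]) := by
      unfold pvStepB
      rw [pvOptionsEq cur chi []]
      simp
    -- B's ext list = (options list).map (append cur to the chain component)
    have hext : (chi.filter (fun t => pvValidB cur (PySem.List.pyGetD t.2.2 (-1) []))).map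
          (fun t => (t.1 + 1,
            t.2.1 + (pvPg cur "book_page" - pvPg (PySem.List.pyGetD t.2.2 (-1) []) "book_page"),
            t.2.2 ++ [cur]))
        = ((chi.filter (fun t => pvValidB cur (PySem.List.pyGetD t.2.2 (-1) []))).map
            (pvOptB cur)).map (fun u => (u.1, u.2.1, u.2.2 ++ [cur])) := by
      rw [List.map_map]
      apply List.map_congr_left
      intro t _
      rfl
    rw [hext]
    -- ch[i] extraction helper
    have hchia : ∀ e, pvStepB chi cur = chi ++ [e] → ch.getD i (0, 0, []) = e := by
      intro e he
      obtain ⟨s, hs⟩ := hprefsucc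
      rw [← hs, he]
      rw [List.getD_eq_getElem _ _ (by simp only [List.append_assoc, List.length_append, List.length_cons, List.length_nil, hleni]; omega)]
      rw [List.getElem_append_left (by simp [hleni])]
      exact List.getElem_concat_length hleni.symm _
    -- case split on the options list
    cases hopts : (chi.filter fun t => pvValidB cur (PySem.List.pyGetD t.2.2 (-1) [])).map (pvOptB cur) with
    | nil =>
      simp only [List.map_nil]
      rw [hopts] at hoptB
      exact (hchia _ hoptB).symm
    | cons o rest =>
      rw [hopts] at hoptB
      simp only [List.map_cons]
      rw [pvFoldMaxMap cur rest o]
      exact (hchia _ hoptB).symm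

-- ===== VERDICT (by name: the statement is the Claim_ definition above) =====
theorem select_monotonic_page_observations_spec : Claim_equal_select_monotonic_page_observations := by
  intro candidates _ _
  unfold Spec_select_monotonic_page_observations
  unfold select_monotonic_page_observations select_monotonic_page_observations_alt
  by_cases hc : candidates = []
  · simp [hc]
  · rw [if_neg hc, if_neg hc]
    simp only []
    set ordered := PySem.List.sorted2 candidates
      (fun item => pvPg item "pdf_page") (fun item => pvPg item "book_page") with hord
    have hn : 0 < ordered.length := by
      have hp := PySem.List.sorted2_perm candidates
        (fun item => pvPg item "pdf_page") (fun item => pvPg item "book_page") false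
      have := hp.length_eq
      cases candidates with
      | nil => exact absurd rfl hc
      | cons a l => rw [hord]; rw [this]; simp
    obtain ⟨hinv, hlenA⟩ := pvLoop ordered ordered.length (le_refl _)
    rw [List.take_length] at hinv hlenA
    set st := (PySem.List.enumerate ordered).foldl (pvStepA ordered) [] with hst
    set ch := ordered.foldl pvStepB [] with hchd
    have hchlen : ch.length = ordered.length := by rw [← hinv.1]; exact hlenA
    have hprops : ∀ k (hk' : k < st.length), -1 ≤ st[k].2.2 ∧ st[k].2.2 < (k : Int) := by
      intro k hk'
      obtain ⟨_, _, _, p4, p5, _⟩ := hinv.2.2 k hk' (by omega)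
      exact ⟨p4, p5⟩
    -- B's mapped range list is exactly ch
    have hmapch : (List.range ordered.length).map (pvChain ordered) = ch := by
      apply List.ext_getElem
      · simp [hchlen]
      · intro k h1 h2
        simp only [List.getElem_map, List.getElem_range]
        rw [pvChain_eq_fold ordered k (by simpa using h1)]
        rw [List.getD_eq_getElem _ _ h2]
    rw [hmapch]
    have hr : PySem.List.pyRange 0 (ordered.length : Int) 1
        = (0 : Int) :: PySem.List.pyRange ((1 : Nat) : Int) (ordered.length : Int) 1 := by
      have h := PySem.List.pyRange_one_cons (a := 0) (b := (ordered.length : Int)) (by omega)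
      simpa using h
    rw [hr]
    obtain ⟨c0, rest, hch⟩ : ∃ c0 rest, ch = c0 :: rest := by
      cases hch2 : ch with
      | nil => rw [hch2] at hchlen; simp at hchlen; omega
      | cons a l => exact ⟨_, _, rfl⟩
    rw [hch]
    simp only []
    have hkey : ∀ (k : Nat), k < ch.length →
        (fun idx => ((PySem.List.pyGetD st idx (1, 0, -1)).1,
          (PySem.List.pyGetD st idx (1, 0, -1)).2.1,
          pvPg (PySem.List.pyGetD ordered idx []) "pdf_page")) ((k : Nat) : Int)
          = pvKeyB (ch.getD k (0, 0, [])) := by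
      intro k hk
      have hkst : k < st.length := by omega
      have hko : k < ordered.length := by omega
      obtain ⟨p1, p2, _, _, _, _⟩ := hinv.2.2 k hkst (by omega)
      have hgst : PySem.List.pyGetD st ((k : Nat) : Int) (1, 0, -1) = st[k] := by
        rw [PySem.List.pyGetD_natCast, List.getD_eq_getElem st _ hkst]
      have hgo : PySem.List.pyGetD ordered ((k : Nat) : Int) [] = ordered[k] := by
        rw [PySem.List.pyGetD_natCast, List.getD_eq_getElem ordered _ hko]
      have hlast : PySem.List.pyGetD ch[k].2.2 (-1) [] = ordered[k] :=
        pvChainLast ordered st ch hinv k hkst (by omega) hko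
      simp only [hgst, hgo, pvKeyB, List.getD_eq_getElem ch _ (by omega : k < ch.length), hlast,
        p1, p2]
    have hsel := pvSelRel ch
      (fun idx => ((PySem.List.pyGetD st idx (1, 0, -1)).1,
        (PySem.List.pyGetD st idx (1, 0, -1)).2.1,
        pvPg (PySem.List.pyGetD ordered idx []) "pdf_page"))
      hkey ch.length 1 0 (by omega) (by omega) (by omega)
    rw [show ((1 : Nat) : Int) = (1 : Int) by norm_num] at hsel
    rw [show ((ch.length : Nat) : Int) = (ordered.length : Int) by rw [hchlen]] at hsel
    obtain ⟨hs0, hs1, hs2⟩ := hsel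
    rw [show ch.getD (0 : Int).toNat (0, 0, []) = c0 by rw [hch]; rfl] at hs2
    rw [show ch.drop 1 = rest by rw [hch]; simp] at hs2
    rw [hs2]
    set r := (PySem.List.pyRange 1 (ordered.length : Int) 1).foldl
      (fun b idx => if pvLex3 ((PySem.List.pyGetD st b (1, 0, -1)).1,
        (PySem.List.pyGetD st b (1, 0, -1)).2.1, pvPg (PySem.List.pyGetD ordered b []) "pdf_page")
        ((PySem.List.pyGetD st idx (1, 0, -1)).1, (PySem.List.pyGetD st idx (1, 0, -1)).2.1,
        pvPg (PySem.List.pyGetD ordered idx []) "pdf_page") then idx else b) 0 with hrdef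
    have hrn : r.toNat < ch.length := by omega
    obtain ⟨_, _, _, _, _, p6⟩ := hinv.2.2 r.toNat (by omega) hrn
    rw [List.getD_eq_getElem ch _ hrn, p6]
    congr 1
    rw [show ((r.toNat : Nat) : Int) = r by omega]
    exact pvWalk_fuel ordered st hprops r.toNat r ordered.length (r.toNat + 1) (by omega)
      (by omega) (by omega) (by omega) (by omega)
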